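-- pv_equiv track=rewrite | github.com/Jwinf/visualNetworking_erkai | data_process_utils.py | find_monotonic_sequence
-- ===== SOURCE A (Python) =====
-- def find_monotonic_sequence(sequence, start_index=0):
--     """
--     在整数序列中查找从指定位置开始的第一个单调序列
--
--     参数:
--         sequence: 整数列表
--         start_index: 开始查找的索引位置
--
--     返回:
--         tuple: (start, end, monotonic_type)
--         - start: 单调序列的起始索引
--         - end: 单调序列的结束索引
--         - monotonic_type: 单调类型 ('increasing', 'decreasing', 'equal', 'none')
--     """
--     n = len(sequence)
--
--     # 处理边界情况
--     if n == 0: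
--         return -1, -1, 'none'
--
--     if start_index >= n:
--         return -1, -1, 'none'
--
--     # 如果从起始位置开始只剩一个元素
--     if start_index == n - 1:
--         return start_index, start_index, 'equal'
--
--     # 检查单调性
--     current_start = start_index
--
--     # 检查前两个元素的关系来确定初始单调性
--     if sequence[start_index] < sequence[start_index + 1]:
--         monotonic_type = 'increasing'
--     elif sequence[start_index] > sequence[start_index + 1]:
--         monotonic_type = 'decreasing'
--     else:
--         monotonic_type = 'equal'
--
--     # 从第三个元素开始继续检查
--     i = start_index + 2
--     while i < n:
--         if monotonic_type == 'increasing':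
--             if sequence[i] >= sequence[i - 1]:
--                 # 继续保持递增
--                 pass
--             else:
--                 # 单调性改变，结束当前序列
--                 break
--         elif monotonic_type == 'decreasing':
--             if sequence[i] <= sequence[i - 1]:
--                 # 继续保持递减
--                 pass
--             else:
--                 # 单调性改变，结束当前序列
--                 break
--         elif monotonic_type == 'equal':
--             if sequence[i] > sequence[i - 1]:
--                 monotonic_type = 'increasing'
--             elif sequence[i] < sequence[i - 1]:
--                 monotonic_type = 'decreasing'
--             # 如果继续相等，保持 'equal'
--
--         i += 1
--
--     # 返回结果
--     end_index = i - 1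
--
--     return current_start, end_index, monotonic_type
-- ===== SOURCE B (Python) =====
-- def find_monotonic_sequence(sequence, start_index=0):
--     n = len(sequence)
--     if n == 0 or start_index >= n:
--         return -1, -1, 'none'
--     if start_index == n - 1:
--         return start_index, start_index, 'equal'
--     # pairwise comparison signs: +1 rise, -1 fall, 0 equal
--     signs = [(sequence[j] > sequence[j - 1]) - (sequence[j] < sequence[j - 1])
--              for j in range(start_index + 1, n)]
--     first = next((k for k, v in enumerate(signs) if v != 0), None)
--     if first is None:
--         return start_index, n - 1, 'equal'
--     bad = signs[first]
--     mono = 'increasing' if bad > 0 else 'decreasing'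
--     stop = next((k for k, v in enumerate(signs) if v == -bad), None)
--     end = n - 1 if stop is None else start_index + stop
--     return start_index, end, mono
-- ===== Notes on version B (the rewrite author's own statement) =====
-- stated objective: alternative
-- what changed: Replaces A's single stateful while-loop (mutable monotonic_type state machine with an 'equal'-upgrade) by a two-scan formulation over a precomputed list of pairwise comparison signs: the first nonzero sign fixes the direction, the first opposite sign fixes the end index.
import Mathlib
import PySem

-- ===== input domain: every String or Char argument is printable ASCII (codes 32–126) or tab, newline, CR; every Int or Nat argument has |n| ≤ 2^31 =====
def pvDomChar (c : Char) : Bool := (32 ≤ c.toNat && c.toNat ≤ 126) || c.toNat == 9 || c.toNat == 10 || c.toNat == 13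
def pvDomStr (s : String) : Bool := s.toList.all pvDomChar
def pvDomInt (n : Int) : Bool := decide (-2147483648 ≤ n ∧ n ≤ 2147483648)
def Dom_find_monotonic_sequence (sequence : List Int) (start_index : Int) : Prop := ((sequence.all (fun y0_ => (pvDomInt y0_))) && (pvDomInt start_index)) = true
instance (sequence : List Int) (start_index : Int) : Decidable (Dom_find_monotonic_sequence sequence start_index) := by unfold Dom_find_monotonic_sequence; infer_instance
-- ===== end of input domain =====

-- B replaces A's stateful while-loop by two scans over a precomputed list of pairwise
-- comparison signs (alternative decomposition, same O(n) cost).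


-- ===== PORT A =====
-- sequence[i] with Python's negative-index wraparound; Pre_ guarantees the index is in
-- range, so the .getD default is never reached on admitted inputs.
def pvGetZ (seq : List Int) (i : Int) : Int := (PySem.List.pyGet? seq i).getD 0

-- the 'while i < n' loop of A, with its mutable state (i, monotonic_type)
def pvLoopA (seq : List Int) (n : Int) (mt : String) (i : Int) : Int × String :=
  if _h : i < n then
    if mt = "increasing" then
      if pvGetZ seq i ≥ pvGetZ seq (i - 1) then pvLoopA seq n mt (i + 1)
      else (i, mt)
    else if mt = "decreasing" then
      if pvGetZ seq i ≤ pvGetZ seq (i - 1) then pvLoopA seq n mt (i + 1)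
      else (i, mt)
    else
      if pvGetZ seq i > pvGetZ seq (i - 1) then pvLoopA seq n "increasing" (i + 1)
      else if pvGetZ seq i < pvGetZ seq (i - 1) then pvLoopA seq n "decreasing" (i + 1)
      else pvLoopA seq n mt (i + 1)
  else (i, mt)
termination_by (n - i).toNat
decreasing_by all_goals omega

def find_monotonic_sequence (sequence : List Int) (start_index : Int) : Int × Int × String :=
  let n : Int := sequence.length
  if n = 0 then (-1, -1, "none")
  else if start_index ≥ n then (-1, -1, "none")
  else if start_index = n - 1 then (start_index, start_index, "equal")
  else
    let monotonic_type : String :=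
      if pvGetZ sequence start_index < pvGetZ sequence (start_index + 1) then "increasing"
      else if pvGetZ sequence start_index > pvGetZ sequence (start_index + 1) then "decreasing"
      else "equal"
    let r := pvLoopA sequence n monotonic_type (start_index + 2)
    (start_index, r.1 - 1, r.2)

-- ===== PORT B =====
-- (b > a) - (b < a), Python booleans as ints
def pvSgn (a b : Int) : Int := (if b > a then 1 else 0) - (if b < a then 1 else 0)

def find_monotonic_sequence_alt (sequence : List Int) (start_index : Int) : Int × Int × String :=
  let n : Int := sequence.length
  if n = 0 ∨ start_index ≥ n then (-1, -1, "none")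
  else if start_index = n - 1 then (start_index, start_index, "equal")
  else
    let signs : List Int := (PySem.List.pyRange (start_index + 1) n 1).map
      (fun j => pvSgn (pvGetZ sequence (j - 1)) (pvGetZ sequence j))
    match signs.findIdx? (fun v => v ≠ 0) with
    | none => (start_index, n - 1, "equal")
    | some k =>
      let bad := signs.getD k 0
      let mono : String := if bad > 0 then "increasing" else "decreasing"
      match signs.findIdx? (fun v => v = -bad) with
      | none => (start_index, n - 1, mono)
      | some m => (start_index, start_index + (m : Int), mono)

-- ===== PRECONDITION & SPEC =====
-- Pre_ excludes exactly the inputs where Python A raises IndexError (nonempty sequence with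
-- start_index < -len(sequence)); B raises there too.
def Pre_find_monotonic_sequence (sequence : List Int) (start_index : Int) : Prop :=
  sequence = [] ∨ start_index ≥ (sequence.length : Int) ∨ -(sequence.length : Int) ≤ start_index
instance (sequence : List Int) (start_index : Int) : Decidable (Pre_find_monotonic_sequence sequence start_index) := by unfold Pre_find_monotonic_sequence; infer_instance

def pvWitness_find_monotonic_sequence : List Int × Int := ([1, 2, 2, 1], 0)

def Spec_find_monotonic_sequence (sequence : List Int) (start_index : Int) (out : Int × Int × String) : Prop := out = find_monotonic_sequence_alt sequence start_index
instance (sequence : List Int) (start_index : Int) (out : Int × Int × String) : Decidable (Spec_find_monotonic_sequence sequence start_index out) := by unfold Spec_find_monotonic_sequence; infer_instance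

-- ===== CLAIM (what is proved, stated in full; the proofs are below) =====
def Claim_equal_find_monotonic_sequence : Prop := ∀ (sequence : List Int) (start_index : Int), Dom_find_monotonic_sequence sequence start_index → Pre_find_monotonic_sequence sequence start_index → Spec_find_monotonic_sequence sequence start_index (find_monotonic_sequence sequence start_index)

-- ===== LEMMAS AND PROOFS =====

-- abstract state machine of A's loop over a list of comparison signs:
-- returns (number of signs consumed, final type)
def pvRunA (mt : String) (L : List Int) : Nat × String :=
  match L with
  | [] => (0, mt)
  | v :: t =>
    if mt = "increasing" then
      if v ≥ 0 then ((pvRunA mt t).1 + 1, (pvRunA mt t).2) else (0, mt)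
    else if mt = "decreasing" then
      if v ≤ 0 then ((pvRunA mt t).1 + 1, (pvRunA mt t).2) else (0, mt)
    else
      let mt' := if v > 0 then "increasing" else if v < 0 then "decreasing" else mt
      ((pvRunA mt' t).1 + 1, (pvRunA mt' t).2)

def pvSigns (seq : List Int) (i n : Int) : List Int :=
  (PySem.List.pyRange i n 1).map (fun j => pvSgn (pvGetZ seq (j - 1)) (pvGetZ seq j))

theorem pvSigns_cons (seq : List Int) (i n : Int) (h : i < n) :
    pvSigns seq i n = pvSgn (pvGetZ seq (i - 1)) (pvGetZ seq i) :: pvSigns seq (i + 1) n := by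
  unfold pvSigns
  rw [PySem.List.pyRange_one_cons h]
  simp

theorem pvSigns_nil (seq : List Int) (i n : Int) (h : n ≤ i) : pvSigns seq i n = [] := by
  unfold pvSigns
  rw [PySem.List.pyRange_one_eq_nil h]
  simp

theorem pvSgn_nonneg (a b : Int) : 0 ≤ pvSgn a b ↔ a ≤ b := by
  unfold pvSgn; split_ifs <;> omega

theorem pvSgn_nonpos (a b : Int) : pvSgn a b ≤ 0 ↔ b ≤ a := by
  unfold pvSgn; split_ifs <;> omega

theorem pvSgn_pos (a b : Int) : 0 < pvSgn a b ↔ a < b := by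
  unfold pvSgn; split_ifs <;> omega

theorem pvSgn_neg (a b : Int) : pvSgn a b < 0 ↔ b < a := by
  unfold pvSgn; split_ifs <;> omega

theorem pvLoopA_eq_runA (seq : List Int) (n : Int) (mt : String) (i : Int) :
    pvLoopA seq n mt i =
      (i + ((pvRunA mt (pvSigns seq i n)).1 : Int), (pvRunA mt (pvSigns seq i n)).2) := by
  fun_induction pvLoopA seq n mt i with
  | case1 i h hc ih =>
    rw [ih, pvSigns_cons seq i n h]
    have hv : pvSgn (pvGetZ seq (i - 1)) (pvGetZ seq i) ≥ 0 := (pvSgn_nonneg _ _).2 (by omega)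
    simp only [pvRunA, if_pos hv, Prod.mk.injEq, reduceIte]
    refine ⟨by push_cast; ring, trivial⟩
  | case2 i h hc =>
    rw [pvSigns_cons seq i n h]
    have hv : ¬ pvSgn (pvGetZ seq (i - 1)) (pvGetZ seq i) ≥ 0 := by
      rw [ge_iff_le, pvSgn_nonneg]; omega
    simp [pvRunA, hv]
  | case3 i h hc hne ih =>
    rw [ih, pvSigns_cons seq i n h]
    have hv : pvSgn (pvGetZ seq (i - 1)) (pvGetZ seq i) ≤ 0 := (pvSgn_nonpos _ _).2 (by omega)
    simp only [pvRunA, if_neg hne, if_pos hv, Prod.mk.injEq, reduceIte]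
    refine ⟨by push_cast; ring, trivial⟩
  | case4 i h hc hne =>
    rw [pvSigns_cons seq i n h]
    have hv : ¬ pvSgn (pvGetZ seq (i - 1)) (pvGetZ seq i) ≤ 0 := by
      rw [pvSgn_nonpos]; omega
    simp [pvRunA, hne, hv]
  | case5 mt i h hne1 hne2 hc ih =>
    rw [ih, pvSigns_cons seq i n h]
    have hv : pvSgn (pvGetZ seq (i - 1)) (pvGetZ seq i) > 0 := (pvSgn_pos _ _).2 hc
    simp only [pvRunA, if_neg hne1, if_neg hne2, if_pos hv, Prod.mk.injEq]
    refine ⟨by push_cast; ring, trivial⟩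
  | case6 mt i h hne1 hne2 hc1 hc ih =>
    rw [ih, pvSigns_cons seq i n h]
    have hv1 : ¬ pvSgn (pvGetZ seq (i - 1)) (pvGetZ seq i) > 0 := by
      rw [gt_iff_lt, pvSgn_pos]; omega
    have hv : pvSgn (pvGetZ seq (i - 1)) (pvGetZ seq i) < 0 := (pvSgn_neg _ _).2 hc
    simp only [pvRunA, if_neg hne1, if_neg hne2, if_neg hv1, if_pos hv, Prod.mk.injEq]
    refine ⟨by push_cast; ring, trivial⟩
  | case7 mt i h hne1 hne2 hc1 hc2 ih =>
    rw [ih, pvSigns_cons seq i n h]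
    have hv1 : ¬ pvSgn (pvGetZ seq (i - 1)) (pvGetZ seq i) > 0 := by
      rw [gt_iff_lt, pvSgn_pos]; omega
    have hv2 : ¬ pvSgn (pvGetZ seq (i - 1)) (pvGetZ seq i) < 0 := by
      rw [pvSgn_neg]; omega
    simp only [pvRunA, if_neg hne1, if_neg hne2, if_neg hv1, if_neg hv2, Prod.mk.injEq]
    refine ⟨by push_cast; ring, trivial⟩
  | case8 mt i h =>
    rw [pvSigns_nil seq i n (by omega)]
    simp [pvRunA]


theorem pvRunA_inc (t : List Int) :
    pvRunA "increasing" t = (t.findIdx (fun v => decide (v < 0)), "increasing") := by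
  induction t with
  | nil => simp [pvRunA]
  | cons v t ih =>
    by_cases h : v ≥ 0
    · have hv : ¬ v < 0 := by omega
      simp [pvRunA, h, ih, List.findIdx_cons, hv]
    · have hv : v < 0 := by omega
      simp [pvRunA, h, List.findIdx_cons, hv]

theorem pvRunA_dec (t : List Int) :
    pvRunA "decreasing" t = (t.findIdx (fun v => decide (0 < v)), "decreasing") := by
  induction t with
  | nil => simp [pvRunA]
  | cons v t ih =>
    by_cases h : v ≤ 0
    · have hv : ¬ 0 < v := by omega
      simp [pvRunA, h, ih, List.findIdx_cons, hv]
    · have hv : 0 < v := by omega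
      simp [pvRunA, h, List.findIdx_cons, hv]

theorem pvFindIdx_congr {α : Type} (p q : α → Bool) (L : List α)
    (h : ∀ x ∈ L, p x = q x) : L.findIdx p = L.findIdx q := by
  induction L with
  | nil => rfl
  | cons x t ih =>
    have hx := h x (by simp)
    simp only [List.findIdx_cons, hx, ih (fun y hy => h y (by simp [hy]))]

theorem pvRunA_equal (L : List Int) (hv : ∀ v ∈ L, v = -1 ∨ v = 0 ∨ v = 1) :
    pvRunA "equal" L =
      match L.findIdx? (fun v => v ≠ 0) with
      | none => (L.length, "equal")
      | some k =>
        let bad := L.getD k 0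
        (L.findIdx (fun v => decide (v = -bad)), if bad > 0 then "increasing" else "decreasing") := by
  induction L with
  | nil => simp [pvRunA]
  | cons v t ih =>
    have hvals := hv v (by simp)
    have ht : ∀ x ∈ t, x = -1 ∨ x = 0 ∨ x = 1 := fun x hx => hv x (by simp [hx])
    rcases hvals with h1 | h0 | hp
    · -- v = -1 : direction becomes decreasing
      subst h1
      have e1 : pvRunA "equal" ((-1 : Int) :: t)
          = ((pvRunA "decreasing" t).1 + 1, (pvRunA "decreasing" t).2) := by
        simp [pvRunA]
      have e2 : List.findIdx? (fun v => decide (v ≠ 0)) ((-1 : Int) :: t) = some 0 := by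
        rw [List.findIdx?_cons]; norm_num
      rw [e1, pvRunA_dec, e2]
      have e3 : t.findIdx (fun v => decide (0 < v))
          = t.findIdx (fun v => decide (v = -(-1 : Int))) := by
        apply pvFindIdx_congr
        intro x hx
        rcases ht x hx with h | h | h <;> subst h <;> decide
      simp only [List.getD_cons_zero, List.findIdx_cons, e3]
      norm_num
    · -- v = 0 : stay equal, recurse
      subst h0
      have e1 : pvRunA "equal" ((0 : Int) :: t)
          = ((pvRunA "equal" t).1 + 1, (pvRunA "equal" t).2) := by
        simp [pvRunA]
      rw [e1, ih ht, List.findIdx?_cons]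
      rw [show (decide ((0 : Int) ≠ 0)) = false from by decide]
      rw [if_neg (by simp)]
      cases hfi : t.findIdx? (fun v => decide (v ≠ 0)) with
      | none => simp
      | some k =>
        obtain ⟨hk, hfe⟩ := List.findIdx?_eq_some_iff_findIdx_eq.1 hfi
        have hbadne : t.getD k 0 ≠ 0 := by
          have hp := List.findIdx_getElem (p := fun v => decide (v ≠ 0)) (xs := t)
            (w := by rw [hfe]; exact hk)
          revert hp
          simp only [List.getD_eq_getElem t 0 hk, hfe]
          intro hp
          simpa using hp
        simp only [Option.map_some, List.getD_cons_succ, List.findIdx_cons]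
        rw [show (decide ((0 : Int) = -t.getD k 0)) = false from
          decide_eq_false (by omega)]
        simp only [cond_false]
    · -- v = 1 : direction becomes increasing
      subst hp
      have e1 : pvRunA "equal" ((1 : Int) :: t)
          = ((pvRunA "increasing" t).1 + 1, (pvRunA "increasing" t).2) := by
        simp [pvRunA]
      have e2 : List.findIdx? (fun v => decide (v ≠ 0)) ((1 : Int) :: t) = some 0 := by
        rw [List.findIdx?_cons]; norm_num
      rw [e1, pvRunA_inc, e2]
      have e3 : t.findIdx (fun v => decide (v < 0))
          = t.findIdx (fun v => decide (v = -(1 : Int))) := by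
        apply pvFindIdx_congr
        intro x hx
        rcases ht x hx with h | h | h <;> subst h <;> decide
      simp only [List.getD_cons_zero, List.findIdx_cons, e3]
      norm_num

-- ===== VERDICT (by name: the statement is the Claim_ definition above) =====
theorem find_monotonic_sequence_spec : Claim_equal_find_monotonic_sequence := by
  intro seq s _hdom _hpre
  unfold Spec_find_monotonic_sequence find_monotonic_sequence find_monotonic_sequence_alt
  by_cases h0 : (seq.length : Int) = 0
  · simp [h0]
  · by_cases hge : s ≥ (seq.length : Int)
    · simp [hge]
    · by_cases hlast : s = (seq.length : Int) - 1
      · simp [hlast]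
      · simp only [if_neg h0, if_neg hge, if_neg hlast, if_neg (show
          ¬ ((seq.length : Int) = 0 ∨ s ≥ (seq.length : Int)) from by omega)]
        rw [show ∀ i : Int, List.map (fun j => pvSgn (pvGetZ seq (j - 1)) (pvGetZ seq j))
          (PySem.List.pyRange i (seq.length : Int) 1) = pvSigns seq i (seq.length : Int)
          from fun i => rfl]
        have hs1 : s + 1 < (seq.length : Int) := by omega
        have hvals : ∀ v ∈ pvSigns seq (s + 1) (seq.length : Int), v = -1 ∨ v = 0 ∨ v = 1 := by
          intro v hvmem
          unfold pvSigns at hvmem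
          simp only [List.mem_map] at hvmem
          obtain ⟨j, _, rfl⟩ := hvmem
          unfold pvSgn; split_ifs <;> omega
        have hkey := pvRunA_equal (pvSigns seq (s + 1) (seq.length : Int)) hvals
        have hcons : pvSigns seq (s + 1) (seq.length : Int)
            = pvSgn (pvGetZ seq s) (pvGetZ seq (s + 1)) :: pvSigns seq (s + 2) (seq.length : Int) := by
          rw [pvSigns_cons seq (s + 1) _ hs1, show s + 1 - 1 = s from by ring,
            show s + 1 + 1 = s + 2 from by ring]
        have hmt : (if pvGetZ seq s < pvGetZ seq (s + 1) then "increasing"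
              else if pvGetZ seq s > pvGetZ seq (s + 1) then "decreasing" else "equal")
            = (if pvSgn (pvGetZ seq s) (pvGetZ seq (s + 1)) > 0 then "increasing"
              else if pvSgn (pvGetZ seq s) (pvGetZ seq (s + 1)) < 0 then "decreasing" else "equal") := by
          rcases lt_trichotomy (pvGetZ seq s) (pvGetZ seq (s + 1)) with h | h | h
          · rw [if_pos h, if_pos (by rw [gt_iff_lt, pvSgn_pos]; exact h)]
          · rw [if_neg (by omega), if_neg (by omega),
              if_neg (by rw [gt_iff_lt, pvSgn_pos]; omega), if_neg (by rw [pvSgn_neg]; omega)]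
          · rw [if_neg (by omega), if_pos (by omega),
              if_neg (by rw [gt_iff_lt, pvSgn_pos]; omega), if_pos (by rw [pvSgn_neg]; exact h)]
        have hL2 : pvRunA "equal" (pvSigns seq (s + 1) (seq.length : Int))
            = ((pvRunA (if pvGetZ seq s < pvGetZ seq (s + 1) then "increasing"
                else if pvGetZ seq s > pvGetZ seq (s + 1) then "decreasing" else "equal")
                (pvSigns seq (s + 2) (seq.length : Int))).1 + 1,
               (pvRunA (if pvGetZ seq s < pvGetZ seq (s + 1) then "increasing"
                else if pvGetZ seq s > pvGetZ seq (s + 1) then "decreasing" else "equal")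
                (pvSigns seq (s + 2) (seq.length : Int))).2) := by
          rw [hcons, hmt]
          simp [pvRunA]
        have hlenL : ((pvSigns seq (s + 1) (seq.length : Int)).length : Int)
            = (seq.length : Int) - s - 1 := by
          unfold pvSigns
          rw [List.length_map, PySem.List.length_pyRange_one]
          omega
        rw [hL2] at hkey
        rw [pvLoopA_eq_runA]
        cases hfi : (pvSigns seq (s + 1) (seq.length : Int)).findIdx? (fun v => decide (v ≠ 0)) with
        | none =>
          rw [hfi] at hkey
          rw [Prod.mk.injEq] at hkey
          obtain ⟨hc, hm⟩ := hkey
          simp only [Prod.mk.injEq]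
          exact ⟨trivial, by omega, hm⟩
        | some k =>
          rw [hfi] at hkey
          simp only [Prod.mk.injEq] at hkey
          obtain ⟨hc, hm⟩ := hkey
          simp only []
          cases hfo : (pvSigns seq (s + 1) (seq.length : Int)).findIdx?
              (fun v => decide (v = -(pvSigns seq (s + 1) (seq.length : Int)).getD k 0)) with
          | none =>
            have hfl := List.findIdx_eq_length.2 (fun x hx => List.findIdx?_eq_none_iff.1 hfo x hx)
            rw [hfl] at hc
            simp only [Prod.mk.injEq]
            exact ⟨trivial, by omega, hm⟩
          | some m =>
            obtain ⟨hmlt, hfe⟩ := List.findIdx?_eq_some_iff_findIdx_eq.1 hfo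
            rw [hfe] at hc
            simp only [Prod.mk.injEq]
            exact ⟨trivial, by omega, hm⟩
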